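-- pv_equiv track=rewrite | github.com/zshoob/hps | gerrymander/evaluate.py | row_edges
-- ===== SOURCE A (Python) =====
-- def row_edges(P,row,d):
-- 	'''
-- 		Returns a list of coordinates for all points in row @row of
-- 		partition map @P which lie on a boundary of district @d
-- 	'''
-- 	edges = []
-- 	for col in range(len(P[row])):
-- 		if P[row][col] == d:
-- 			if col == 0 or P[row][col-1] != d:
-- 				edges.append([row,col])
-- 			elif col == len(P[row])-1 or P[row][col+1] != d:
-- 				edges.append([row,col])
-- 	return edges
-- ===== SOURCE B (Python) =====
-- def row_edges(P, row, d):
--     r = P[row]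
--     edges = []
--     start = None  # start index of the current run of cells equal to d
--     for col, v in enumerate(r):
--         if v == d:
--             if start is None:
--                 start = col
--         else:
--             if start is not None:
--                 edges.append([row, start])
--                 if col - 1 != start:
--                     edges.append([row, col - 1])
--                 start = None
--     if start is not None:
--         edges.append([row, start])
--         if len(r) - 1 != start:
--             edges.append([row, len(r) - 1])
--     return edges
-- ===== Notes on version B (the rewrite author's own statement) =====
-- stated objective: alternative
-- what changed: A tests each cell's left/right neighbours by repeated indexing into P[row]; B makes a single enumerate pass that tracks the start index of the current contiguous run of d-cells and emits the run's endpoints when the run ends.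
import Mathlib
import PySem

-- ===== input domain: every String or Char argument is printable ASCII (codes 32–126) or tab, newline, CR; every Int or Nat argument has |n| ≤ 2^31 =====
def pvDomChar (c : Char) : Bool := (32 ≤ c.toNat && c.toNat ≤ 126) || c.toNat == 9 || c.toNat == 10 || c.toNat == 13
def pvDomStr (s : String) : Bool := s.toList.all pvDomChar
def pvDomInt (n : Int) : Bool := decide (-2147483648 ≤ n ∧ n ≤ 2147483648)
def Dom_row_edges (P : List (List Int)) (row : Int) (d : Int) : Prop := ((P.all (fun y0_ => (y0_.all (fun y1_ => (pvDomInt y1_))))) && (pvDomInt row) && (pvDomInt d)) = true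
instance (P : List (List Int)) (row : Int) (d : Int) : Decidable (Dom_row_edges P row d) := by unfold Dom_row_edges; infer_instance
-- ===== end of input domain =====

-- B replaces A's per-cell left/right neighbour tests (by repeated indexing) with a single
-- left-to-right pass that tracks the start of the current run of d-cells and emits the run's
-- endpoints when the run ends (objective: alternative decomposition, same cost class).

-- ===== PORT A =====
def row_edges (P : List (List Int)) (row : Int) (d : Int) : List (List Int) :=
  let r := (PySem.List.pyGet? P row).getD []
  (PySem.List.pyRange 0 (r.length : Int) 1).foldl (fun edges col =>
    if PySem.List.pyGetD r col 0 = d then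
      if col = 0 ∨ PySem.List.pyGetD r (col - 1) 0 ≠ d then
        edges ++ [[row, col]]
      else if col = (r.length : Int) - 1 ∨ PySem.List.pyGetD r (col + 1) 0 ≠ d then
        edges ++ [[row, col]]
      else edges
    else edges) []

-- ===== PORT B =====
-- the loop of Source B: `start` is the index where the current run of d-cells began (none outside a run)
def rowEdgesAltLoop (row d : Int) (l : List Int) (i : Int) (start : Option Int)
    (edges : List (List Int)) : List (List Int) :=
  match l with
  | [] =>
    match start with
    | none => edges
    | some s => edges ++ [[row, s]] ++ (if i - 1 ≠ s then [[row, i - 1]] else [])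
  | v :: t =>
    if v = d then
      match start with
      | none => rowEdgesAltLoop row d t (i + 1) (some i) edges
      | some s => rowEdgesAltLoop row d t (i + 1) (some s) edges
    else
      match start with
      | none => rowEdgesAltLoop row d t (i + 1) none edges
      | some s =>
        rowEdgesAltLoop row d t (i + 1) none
          (edges ++ [[row, s]] ++ (if i - 1 ≠ s then [[row, i - 1]] else []))

def row_edges_alt (P : List (List Int)) (row : Int) (d : Int) : List (List Int) :=
  let r := (PySem.List.pyGet? P row).getD []
  rowEdgesAltLoop row d r 0 none []

-- ===== PRECONDITION & SPEC =====
-- A raises IndexError iff the row index is out of range for P (both programs do P[row] first).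
def Pre_row_edges (P : List (List Int)) (row : Int) (d : Int) : Prop :=
  PySem.Raise.InRange P.length row
instance (P : List (List Int)) (row : Int) (d : Int) : Decidable (Pre_row_edges P row d) := by
  unfold Pre_row_edges; infer_instance

def pvWitness_row_edges : List (List Int) × Int × Int := ([[1, 1, 2, 1]], 0, 1)

def Spec_row_edges (P : List (List Int)) (row : Int) (d : Int) (out : List (List Int)) : Prop := out = row_edges_alt P row d
instance (P : List (List Int)) (row : Int) (d : Int) (out : List (List Int)) : Decidable (Spec_row_edges P row d out) := by unfold Spec_row_edges; infer_instance

-- ===== CLAIM (what is proved, stated in full; the proofs are below) =====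
def Claim_equal_row_edges : Prop := ∀ (P : List (List Int)) (row : Int) (d : Int), Dom_row_edges P row d → Pre_row_edges P row d → Spec_row_edges P row d (row_edges P row d)

-- ===== LEMMAS AND PROOFS =====

-- common characterisation: the emissions of A's scan on the suffix `l` starting at index `i`,
-- where `prev` says "the previous cell exists and equals d"
def aSpec (row d : Int) (prev : Bool) (i : Int) : List Int → List (List Int)
  | [] => []
  | c :: t =>
    (if c = d ∧ (prev = false ∨ t.head? ≠ some d) then [[row, i]] else []) ++
      aSpec row d (decide (c = d)) (i + 1) t

def pvPrev (d : Int) (pre : List Int) : Bool :=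
  match pre.getLast? with
  | none => false
  | some x => decide (x = d)

theorem prevD_concat (d c : Int) (pre : List Int) :
    pvPrev d (pre ++ [c]) = decide (c = d) := by
  simp [pvPrev]

theorem foldA (row d : Int) : ∀ (t pre : List Int) (acc : List (List Int)),
    (PySem.List.pyRange (pre.length : Int) (((pre ++ t).length : Nat) : Int) 1).foldl
      (fun edges col =>
        if PySem.List.pyGetD (pre ++ t) col 0 = d then
          if col = 0 ∨ PySem.List.pyGetD (pre ++ t) (col - 1) 0 ≠ d then
            edges ++ [[row, col]]
          else if col = (((pre ++ t).length : Nat) : Int) - 1 ∨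
              PySem.List.pyGetD (pre ++ t) (col + 1) 0 ≠ d then
            edges ++ [[row, col]]
          else edges
        else edges) acc
    = acc ++ aSpec row d (pvPrev d pre) (pre.length : Int) t := by
  intro t
  induction t with
  | nil =>
    intro pre acc
    rw [PySem.List.pyRange_one_eq_nil (by simp)]
    simp [aSpec]
  | cons c rest ih =>
    intro pre acc
    have hlt : (pre.length : Int) < (((pre ++ c :: rest).length : Nat) : Int) := by
      simp only [List.length_append, List.length_cons]
      push_cast; omega
    rw [PySem.List.pyRange_one_cons hlt]
    rw [List.foldl_cons]
    -- evaluate the step at col = pre.length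
    have hc : PySem.List.pyGetD (pre ++ c :: rest) (pre.length : Int) 0 = c := by
      simp [PySem.List.pyGetD]
    have hb1 : ((pre.length : Int) = 0 ∨
        PySem.List.pyGetD (pre ++ c :: rest) ((pre.length : Int) - 1) 0 ≠ d)
        ↔ pvPrev d pre = false := by
      cases pre using List.reverseRecOn with
      | nil => simp [pvPrev]
      | append_singleton p x =>
        have hx : PySem.List.pyGetD ((p ++ [x]) ++ c :: rest) (((p ++ [x]).length : Int) - 1) 0 = x := by
          have h1 : ((p ++ [x]).length : Int) - 1 = (p.length : Int) := by simp
          have h2 : (p ++ [x]) ++ c :: rest = p ++ x :: c :: rest := by simp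
          rw [h1, h2]
          simp [PySem.List.pyGetD]
        rw [hx, prevD_concat]
        simp only [List.length_append, List.length_cons, List.length_nil,
          decide_eq_false_iff_not, ne_eq]
        push_cast
        constructor
        · rintro (h | h)
          · exfalso; omega
          · exact h
        · intro h; right; exact h
    have hb2 : ((pre.length : Int) = (((pre ++ c :: rest).length : Nat) : Int) - 1 ∨
        PySem.List.pyGetD (pre ++ c :: rest) ((pre.length : Int) + 1) 0 ≠ d)
        ↔ rest.head? ≠ some d := by
      cases rest with
      | nil =>
        have hlen : (pre.length : Int) = (((pre ++ [c]).length : Nat) : Int) - 1 := by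
          simp
        constructor
        · intro _; simp
        · intro _; exact Or.inl hlen
      | cons y ys =>
        have hy : PySem.List.pyGetD (pre ++ c :: y :: ys) ((pre.length : Int) + 1) 0 = y := by
          have h3 := PySem.List.pyGet?_append_right (pre := pre) (ys := c :: y :: ys) (k := 1)
          push_cast at h3
          simp only [List.getElem?_cons_succ, List.getElem?_cons_zero] at h3
          simp [PySem.List.pyGetD, h3]
        have hlen : ¬ ((pre.length : Int) = (((pre ++ c :: y :: ys).length : Nat) : Int) - 1) := by
          simp only [List.length_append, List.length_cons]
          push_cast; omega
        rw [hy]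
        simp only [List.head?_cons, ne_eq, Option.some.injEq]
        constructor
        · rintro (h | h)
          · exact absurd h hlen
          · exact h
        · intro h; right; exact h
    have hstep : (if PySem.List.pyGetD (pre ++ c :: rest) (pre.length : Int) 0 = d then
          if (pre.length : Int) = 0 ∨
              PySem.List.pyGetD (pre ++ c :: rest) ((pre.length : Int) - 1) 0 ≠ d then
            acc ++ [[row, (pre.length : Int)]]
          else if (pre.length : Int) = (((pre ++ c :: rest).length : Nat) : Int) - 1 ∨
              PySem.List.pyGetD (pre ++ c :: rest) ((pre.length : Int) + 1) 0 ≠ d then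
            acc ++ [[row, (pre.length : Int)]]
          else acc
        else acc)
        = acc ++ (if c = d ∧ (pvPrev d pre = false ∨ rest.head? ≠ some d) then
            [[row, (pre.length : Int)]] else []) := by
      rw [hc]
      simp only [hb1, hb2]
      by_cases h1 : c = d <;> by_cases h2 : pvPrev d pre = false <;>
        by_cases h3 : rest.head? ≠ some d <;>
        simp [h1, h2, h3]
    rw [hstep]
    have hpre' : (pre.length : Int) + 1 = (((pre ++ [c]).length : Nat) : Int) := by simp
    have hfull : pre ++ c :: rest = (pre ++ [c]) ++ rest := by simp
    rw [hpre', hfull]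
    rw [ih (pre ++ [c])]
    rw [prevD_concat]
    simp [aSpec, List.append_assoc]

theorem altLoopSpec (row d : Int) : ∀ (l : List Int),
    (∀ (i : Int) (acc : List (List Int)),
      rowEdgesAltLoop row d l i none acc = acc ++ aSpec row d false i l)
    ∧ (∀ (i s : Int) (acc : List (List Int)), s < i →
      rowEdgesAltLoop row d l i (some s) acc
        = acc ++ [[row, s]]
            ++ (if s < i - 1 ∧ l.head? ≠ some d then [[row, i - 1]] else [])
            ++ aSpec row d true i l) := by
  intro l
  induction l with
  | nil =>
    constructor
    · intro i acc; simp [rowEdgesAltLoop, aSpec]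
    · intro i s acc hs
      simp only [rowEdgesAltLoop, aSpec]
      have h2 : (i - 1 ≠ s) ↔ (s < i - 1) := by omega
      by_cases h : s < i - 1 <;> simp [h, h2]
  | cons v t ih =>
    constructor
    · intro i acc
      by_cases hv : v = d
      · simp only [rowEdgesAltLoop, hv, if_pos]
        rw [ih.2 (i + 1) i acc (by omega)]
        simp [aSpec]
      · simp only [rowEdgesAltLoop, if_neg hv]
        rw [ih.1 (i + 1) acc]
        simp [aSpec, hv]
    · intro i s acc hs
      by_cases hv : v = d
      · simp only [rowEdgesAltLoop, hv, if_pos]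
        rw [ih.2 (i + 1) s acc (by omega)]
        have h1 : s < i + 1 - 1 := by omega
        simp [aSpec, hs, List.append_assoc]
      · simp only [rowEdgesAltLoop, if_neg hv]
        rw [ih.1 (i + 1)]
        have h2 : (i - 1 ≠ s) ↔ (s < i - 1) := by omega
        simp [aSpec, hv, h2, List.append_assoc]

theorem ports_agree (row d : Int) (r : List Int) :
    (PySem.List.pyRange 0 ((r.length : Nat) : Int) 1).foldl
      (fun edges col =>
        if PySem.List.pyGetD r col 0 = d then
          if col = 0 ∨ PySem.List.pyGetD r (col - 1) 0 ≠ d then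
            edges ++ [[row, col]]
          else if col = ((r.length : Nat) : Int) - 1 ∨
              PySem.List.pyGetD r (col + 1) 0 ≠ d then
            edges ++ [[row, col]]
          else edges
        else edges) []
    = rowEdgesAltLoop row d r 0 none [] := by
  have hA := foldA row d r [] []
  simp only [List.nil_append, List.length_nil, Nat.cast_zero] at hA
  have hB := (altLoopSpec row d r).1 0 []
  simp only [List.nil_append] at hB
  refine hA.trans ?_
  rw [hB]
  simp [pvPrev]

theorem row_edges_spec : Claim_equal_row_edges := by
  unfold Claim_equal_row_edges
  intro P row d _ _
  exact ports_agree row d ((PySem.List.pyGet? P row).getD [])
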